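-- pv_equiv track=rewrite | github.com/mauriciolonder/treinadorPronunciaFrances | main.py | handle_apostrophes
-- ===== SOURCE A (Python) =====
-- def handle_apostrophes(words_list):
--     new_words = []
--     for word in words_list:
--         if "'" in word:
--             prefix, sep, suffix = word.partition("'")
--             # Contrações comuns
--             if prefix.lower() in ["l", "d", "j", "qu", "n", "m", "c"]:
--                 combined_word = prefix + suffix
--                 new_words.append(combined_word)
--             else:
--                 new_words.append(word)
--         else:
--             new_words.append(word)
--     return new_words
-- ===== SOURCE B (Python) =====
-- _PREFIXES = ("qu'", "l'", "d'", "j'", "n'", "m'", "c'")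
--
--
-- def _merge(word):
--     lw = word.lower()
--     for p in _PREFIXES:
--         if lw.startswith(p):
--             k = len(p) - 1
--             return word[:k] + word[k + 1:]
--     return word
--
--
-- def handle_apostrophes(words_list):
--     return [_merge(w) for w in words_list]
-- ===== Notes on version B (the rewrite author's own statement) =====
-- stated objective: alternative
-- what changed: Instead of scanning each word for an apostrophe, partitioning it and testing the prefix against a membership list, B matches the lowercased word against the seven fixed contraction prefixes ("qu'", "l'", ...) and deletes that first apostrophe by slicing; no partition or membership test remains.
import Mathlib
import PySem

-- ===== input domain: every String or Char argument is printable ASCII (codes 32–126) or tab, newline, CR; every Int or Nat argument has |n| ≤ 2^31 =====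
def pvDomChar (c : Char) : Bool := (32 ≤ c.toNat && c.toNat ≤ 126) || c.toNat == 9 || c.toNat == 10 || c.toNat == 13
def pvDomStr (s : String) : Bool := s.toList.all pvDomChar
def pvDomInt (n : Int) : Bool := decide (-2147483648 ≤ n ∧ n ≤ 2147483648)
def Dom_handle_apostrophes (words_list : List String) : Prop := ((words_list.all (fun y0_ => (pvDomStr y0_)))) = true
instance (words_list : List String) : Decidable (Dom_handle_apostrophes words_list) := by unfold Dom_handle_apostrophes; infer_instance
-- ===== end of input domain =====

-- B replaces the partition-and-membership test with a case-insensitive leading-prefix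
-- match against the seven contraction prefixes ("qu'" …), deleting that apostrophe (idiomatic).

-- ===== PORT A =====
-- contraction prefixes of A's membership list, as char lists
def pvContr : List (List Char) := [['l'], ['d'], ['j'], ['q','u'], ['n'], ['m'], ['c']]

-- one word of A's loop body; str.partition("'") is ported by hand: the separator is the
-- single character '\'' , so prefix = chars before the first '\'' and suffix = the rest — exact.
def pvProcA (cs : List Char) : List Char :=
  if PySem.Chars.isIn ['\''] cs then
    let pre := cs.takeWhile (fun c => c ≠ '\'')
    let suf := cs.drop (pre.length + 1)
    if PySem.Chars.lower pre ∈ pvContr then pre ++ suf else cs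
  else cs

def handle_apostrophes (words_list : List String) : List String :=
  words_list.foldl (fun acc w => acc ++ [String.mk (pvProcA w.toList)]) []

-- ===== PORT B =====
def pvPrefixes : List (List Char) :=
  [['q','u','\''], ['l','\''], ['d','\''], ['j','\''], ['n','\''], ['m','\''], ['c','\'']]

-- _merge: first contraction prefix of the lowercased word (the for/return loop), then
-- word[:k] + word[k+1:]
def pvMerge (cs : List Char) : List Char :=
  let lw := PySem.Chars.lower cs
  match pvPrefixes.find? (fun p => PySem.Chars.startswith lw p) with
  | some p => cs.take (p.length - 1) ++ cs.drop p.length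
  | none => cs

def handle_apostrophes_alt (words_list : List String) : List String :=
  words_list.map (fun w => String.mk (pvMerge w.toList))

-- ===== PRECONDITION & SPEC =====
def Spec_handle_apostrophes (words_list : List String) (out : List String) : Prop := out = handle_apostrophes_alt words_list
instance (words_list : List String) (out : List String) : Decidable (Spec_handle_apostrophes words_list out) := by unfold Spec_handle_apostrophes; infer_instance

-- ===== CLAIM (what is proved, stated in full; the proofs are below) =====
def Claim_equal_handle_apostrophes : Prop := ∀ (words_list : List String), Dom_handle_apostrophes words_list → Spec_handle_apostrophes words_list (handle_apostrophes words_list)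

-- ===== LEMMAS AND PROOFS =====

theorem pv_lowerChar_apos (c : Char) : PySem.Chars.lowerChar c = '\'' ↔ c = '\'' := by
  constructor
  · intro h
    by_cases hu : PySem.Chars.isupper c = true
    · exfalso
      rw [PySem.Chars.lowerChar, if_pos hu] at h
      simp only [PySem.Chars.isupper, Bool.and_eq_true, decide_eq_true_eq] at hu
      obtain ⟨hA', hZ'⟩ := hu
      have hA : 65 ≤ c.toNat := hA'
      have hZ : c.toNat ≤ 90 := hZ'
      have h2 := congrArg Char.toNat h
      have hv : (c.toNat + 32).isValidChar := Or.inl (by omega)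
      rw [Char.toNat_ofNat, if_pos hv] at h2
      have : ('\''.toNat : Nat) = 39 := by decide
      omega
    · simpa [PySem.Chars.lowerChar, hu] using h
  · intro h; subst h; decide

theorem pv_isIn_apos (cs : List Char) : PySem.Chars.isIn ['\''] cs = true ↔ '\'' ∈ cs := by
  rw [PySem.Chars.isIn_iff_infix]
  exact List.singleton_infix_iff _ _

-- the common per-word behaviour both programs compute
def pvSpecWord (cs : List Char) : List Char :=
  match cs with
  | c0 :: c1 :: rest =>
      if c1 = '\'' then
        (if PySem.Chars.lowerChar c0 ∈ ['l', 'd', 'j', 'n', 'm', 'c'] then c0 :: rest else cs)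
      else
        match rest with
        | c2 :: rest2 =>
            if c2 = '\'' ∧ PySem.Chars.lowerChar c0 = 'q' ∧ PySem.Chars.lowerChar c1 = 'u' then
              c0 :: c1 :: rest2
            else cs
        | [] => cs
  | _ => cs

theorem pv_lc_apos : PySem.Chars.lowerChar '\'' = '\'' := by decide

theorem pv_isIn_apos_false (cs : List Char) (h : '\'' ∉ cs) : PySem.Chars.isIn ['\''] cs = false := by
  rw [Bool.eq_false_iff]; intro ht; exact h ((pv_isIn_apos cs).mp ht)

theorem pvProcA_eq_spec (cs : List Char) : pvProcA cs = pvSpecWord cs := by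
  rcases cs with _ | ⟨c0, _ | ⟨c1, rest⟩⟩
  · decide
  · by_cases h0 : c0 = '\''
    · subst h0; decide
    · simp [pvProcA, pvSpecWord, pv_isIn_apos_false [c0] (by simp only [List.mem_singleton]; exact fun he => h0 he.symm)]
  · by_cases hc1 : c1 = '\''
    · subst hc1
      have hin : PySem.Chars.isIn ['\''] (c0 :: '\'' :: rest) = true :=
        (pv_isIn_apos _).mpr (by simp)
      by_cases h0 : c0 = '\''
      · subst h0
        simp [pvProcA, pvSpecWord, hin, pvContr, PySem.Chars.lower, List.takeWhile, pv_lc_apos]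
      · simp only [pvProcA, hin, if_true]
        simp [pvSpecWord, pvContr, PySem.Chars.lower, List.takeWhile, h0]
    · rcases rest with _ | ⟨c2, rest2⟩
      · by_cases h0 : c0 = '\''
        · subst h0
          have hin : PySem.Chars.isIn ['\''] ['\'', c1] = true := (pv_isIn_apos _).mpr (by simp)
          simp [pvProcA, pvSpecWord, hin, pvContr, PySem.Chars.lower, List.takeWhile, hc1]
        · simp [pvProcA, pvSpecWord, pv_isIn_apos_false [c0, c1] (by simp only [List.mem_cons, List.not_mem_nil, or_false, not_or]; exact ⟨fun he => h0 he.symm, fun he => hc1 he.symm⟩), hc1]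
      · by_cases hc2 : c2 = '\''
        · subst hc2
          have hin : PySem.Chars.isIn ['\''] (c0 :: c1 :: '\'' :: rest2) = true :=
            (pv_isIn_apos _).mpr (by simp)
          by_cases h0 : c0 = '\''
          · subst h0
            simp [pvProcA, pvSpecWord, hin, pvContr, PySem.Chars.lower, List.takeWhile, hc1, pv_lc_apos]
          · simp [pvProcA, pvSpecWord, hin, pvContr, PySem.Chars.lower, List.takeWhile, hc1, h0]
        · by_cases hmem : '\'' ∈ (c0 :: c1 :: c2 :: rest2)
          · have hin : PySem.Chars.isIn ['\''] (c0 :: c1 :: c2 :: rest2) = true :=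
              (pv_isIn_apos _).mpr hmem
            by_cases h0 : c0 = '\''
            · subst h0
              simp [pvProcA, pvSpecWord, hin, pvContr, PySem.Chars.lower, List.takeWhile, hc1, hc2]
            · simp [pvProcA, pvSpecWord, hin, pvContr, PySem.Chars.lower, List.takeWhile, hc1, hc2, h0]
          · simp [pvProcA, pvSpecWord, pv_isIn_apos_false _ hmem, hc1, hc2]

theorem pvMerge_eq_spec (cs : List Char) : pvMerge cs = pvSpecWord cs := by
  rcases cs with _ | ⟨c0, _ | ⟨c1, rest⟩⟩
  · decide
  · simp [pvMerge, pvPrefixes, pvSpecWord, PySem.Chars.lower, PySem.Chars.startswith,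
      List.isPrefixOf, List.find?]
  · by_cases hc1 : c1 = '\''
    · subst hc1
      by_cases h : PySem.Chars.lowerChar c0 ∈ ['l', 'd', 'j', 'n', 'm', 'c']
      · have hs : pvSpecWord (c0 :: '\'' :: rest) = c0 :: rest := by simp [pvSpecWord, h]
        rw [hs]
        simp only [List.mem_cons, List.not_mem_nil, or_false] at h
        rcases h with h|h|h|h|h|h <;>
          simp [pvMerge, pvPrefixes, PySem.Chars.lower, PySem.Chars.startswith, List.isPrefixOf,
            List.find?, pv_lc_apos, h]
      · have hs : pvSpecWord (c0 :: '\'' :: rest) = c0 :: '\'' :: rest := by simp [pvSpecWord, h]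
        rw [hs]
        simp only [List.mem_cons, List.not_mem_nil, or_false, not_or] at h
        obtain ⟨h1,h2,h3,h4,h5,h6⟩ := h
        simp [pvMerge, pvPrefixes, PySem.Chars.lower, PySem.Chars.startswith, List.isPrefixOf,
          List.find?, pv_lc_apos,
          beq_false_of_ne (Ne.symm h1), beq_false_of_ne (Ne.symm h2), beq_false_of_ne (Ne.symm h3),
          beq_false_of_ne (Ne.symm h4), beq_false_of_ne (Ne.symm h5), beq_false_of_ne (Ne.symm h6)]
    · have e1 : ('\'' == PySem.Chars.lowerChar c1) = false :=
        beq_false_of_ne (fun he => hc1 ((pv_lowerChar_apos c1).mp he.symm))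
      rcases rest with _ | ⟨c2, rest2⟩
      · simp [pvMerge, pvPrefixes, pvSpecWord, PySem.Chars.lower, PySem.Chars.startswith,
          List.isPrefixOf, List.find?, e1, hc1]
      · by_cases hc2 : c2 = '\''
        · subst hc2
          by_cases hq : PySem.Chars.lowerChar c0 = 'q'
          · by_cases hu : PySem.Chars.lowerChar c1 = 'u'
            · simp [pvMerge, pvPrefixes, pvSpecWord, PySem.Chars.lower, PySem.Chars.startswith,
                List.isPrefixOf, List.find?, e1, hc1, hq, hu, pv_lc_apos]
            · simp [pvMerge, pvPrefixes, pvSpecWord, PySem.Chars.lower, PySem.Chars.startswith,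
                List.isPrefixOf, List.find?, e1, hc1, hq, pv_lc_apos, beq_false_of_ne (Ne.symm hu)]
              exact hu
          · simp [pvMerge, pvPrefixes, pvSpecWord, PySem.Chars.lower, PySem.Chars.startswith,
              List.isPrefixOf, List.find?, e1, hc1, pv_lc_apos, beq_false_of_ne (Ne.symm hq)]
            exact fun h' => absurd h' hq
        · have e2 : ('\'' == PySem.Chars.lowerChar c2) = false :=
            beq_false_of_ne (fun he => hc2 ((pv_lowerChar_apos c2).mp he.symm))
          simp [pvMerge, pvPrefixes, pvSpecWord, PySem.Chars.lower, PySem.Chars.startswith,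
            List.isPrefixOf, List.find?, e1, e2, hc1, hc2]

-- ===== VERDICT (by name: the statement is the Claim_ definition above) =====
theorem handle_apostrophes_spec : Claim_equal_handle_apostrophes := by
  intro words _
  unfold Spec_handle_apostrophes handle_apostrophes handle_apostrophes_alt
  rw [PySem.List.foldl_append_singleton_eq_map]
  simp only [List.nil_append]
  exact List.map_congr_left fun w _ => by
    rw [pvProcA_eq_spec, pvMerge_eq_spec]
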